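-- pv_equiv track=rewrite | github.com/jessehuss/sudokusolver | optimizedonk.py | eliminate_pointing_pairs
-- ===== SOURCE A (Python) =====
-- def eliminate_pointing_pairs(board, possibilities, box_row, box_col):
--     """
--     Eliminate candidates in row/column based on box constraints (Pointing Pairs).
--     """
--     for num in range(1, 10):
--         mask = 1 << (num - 1)
--         cells = [(r, c) for r in range(box_row, box_row + 3) for c in range(box_col, box_col + 3)
--                  if possibilities[r][c] & mask]
--
--         # If candidates are confined to one row/column within the box
--         if len(cells) > 0:
--             rows, cols = {r for r, _ in cells}, {c for _, c in cells}
--             if len(rows) == 1: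
--                 r = rows.pop()
--                 for c in range(9):
--                     if c < box_col or c >= box_col + 3:
--                         possibilities[r][c] &= ~mask
--                 return True
--             if len(cols) == 1:
--                 c = cols.pop()
--                 for r in range(9):
--                     if r < box_row or r >= box_row + 3:
--                         possibilities[r][c] &= ~mask
--                 return True
--     return False
-- ===== SOURCE B (Python) =====
-- def eliminate_pointing_pairs(board, possibilities, box_row, box_col):
--     """
--     Pointing pairs via aggregate per-row / per-column OR masks of the box:
--     a candidate is confined to one box row (column) iff exactly one of the
--     three aggregate masks contains its bit.
--     """
--     row_masks = [possibilities[box_row + i][box_col]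
--                  | possibilities[box_row + i][box_col + 1]
--                  | possibilities[box_row + i][box_col + 2] for i in range(3)]
--     col_masks = [possibilities[box_row][box_col + j]
--                  | possibilities[box_row + 1][box_col + j]
--                  | possibilities[box_row + 2][box_col + j] for j in range(3)]
--     for num in range(1, 10):
--         bit = 1 << (num - 1)
--         rows_with = [i for i in range(3) if row_masks[i] & bit]
--         if rows_with:
--             if len(rows_with) == 1:
--                 r = box_row + rows_with[0]
--                 for c in range(9):
--                     if c < box_col or c >= box_col + 3:
--                         possibilities[r][c] &= ~bit
--                 return True
--             cols_with = [j for j in range(3) if col_masks[j] & bit]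
--             if len(cols_with) == 1:
--                 c = box_col + cols_with[0]
--                 for r in range(9):
--                     if r < box_row or r >= box_row + 3:
--                         possibilities[r][c] &= ~bit
--                 return True
--     return False
-- ===== Notes on version B (the rewrite author's own statement) =====
-- stated objective: alternative
-- what changed: Instead of materialising, for every candidate number, the list of box cells and its row/column sets, B precomputes six aggregate OR-masks (one per box row and one per box column) once and, for each number, just counts which of the three row masks / column masks contain its bit.
import Mathlib
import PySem

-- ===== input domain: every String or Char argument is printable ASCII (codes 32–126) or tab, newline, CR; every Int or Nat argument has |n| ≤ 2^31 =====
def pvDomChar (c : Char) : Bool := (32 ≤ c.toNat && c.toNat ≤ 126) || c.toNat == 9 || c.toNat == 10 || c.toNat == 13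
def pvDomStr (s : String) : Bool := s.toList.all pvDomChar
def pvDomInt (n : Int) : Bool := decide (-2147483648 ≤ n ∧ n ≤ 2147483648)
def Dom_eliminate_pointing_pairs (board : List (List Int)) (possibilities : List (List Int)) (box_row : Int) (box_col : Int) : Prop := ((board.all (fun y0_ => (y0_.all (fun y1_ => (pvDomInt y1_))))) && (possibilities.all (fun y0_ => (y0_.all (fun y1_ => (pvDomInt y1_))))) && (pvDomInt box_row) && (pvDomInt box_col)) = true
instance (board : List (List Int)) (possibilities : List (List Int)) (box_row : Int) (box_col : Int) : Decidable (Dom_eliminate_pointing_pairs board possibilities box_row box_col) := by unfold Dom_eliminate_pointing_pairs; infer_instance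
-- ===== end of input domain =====

-- B replaces A's per-number cell-list / row-set / column-set construction by six aggregate OR-masks of
-- the box (one per box row, one per box column) computed once, testing for each number which of the
-- three row/column masks contain its bit (objective: alternative decomposition).  Both Pythons perform
-- the same in-place eliminations on `possibilities`; the equivalence proved here is about the RETURN
-- value only (the two Pythons perform identical mutations, which the ports do not model).

-- total read of possibilities[r][c] (Python indexing incl. negative wrap); under Pre_ both
-- indices are always in range, so the getD defaults are never used
def pvCell (possibilities : List (List Int)) (r c : Int) : Int :=
  (PySem.List.pyGet? ((PySem.List.pyGet? possibilities r).getD []) c).getD 0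

-- ===== PORT A =====
def pvBit (possibilities : List (List Int)) (mask r c : Int) : Bool :=
  PySem.Int.band (pvCell possibilities r c) mask != 0
def pvLoopA (possibilities : List (List Int)) (box_row box_col : Int) : List Int → Bool
  | [] => false
  | num :: rest =>
    let mask : Int := (1 : Int) <<< (num - 1).toNat
    let cells : List (Int × Int) :=
      (PySem.List.pyRange box_row (box_row + 3)).flatMap (fun r =>
        ((PySem.List.pyRange box_col (box_col + 3)).filter
          (fun c => pvBit possibilities mask r c)).map (fun c => (r, c)))
    if cells.length > 0 then
      let rows : PySem.Set Int := PySem.Set.ofList (cells.map Prod.fst)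
      let cols : PySem.Set Int := PySem.Set.ofList (cells.map Prod.snd)
      if PySem.Set.len rows = 1 then true
      else if PySem.Set.len cols = 1 then true
      else pvLoopA possibilities box_row box_col rest
    else pvLoopA possibilities box_row box_col rest
def eliminate_pointing_pairs (board : List (List Int)) (possibilities : List (List Int)) (box_row : Int) (box_col : Int) : Bool :=
  pvLoopA possibilities box_row box_col (PySem.List.pyRange 1 10)

-- ===== PORT B =====
def pvRowMask (possibilities : List (List Int)) (box_row box_col i : Int) : Int :=
  PySem.Int.bor (PySem.Int.bor (pvCell possibilities (box_row + i) box_col)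
    (pvCell possibilities (box_row + i) (box_col + 1))) (pvCell possibilities (box_row + i) (box_col + 2))
def pvColMask (possibilities : List (List Int)) (box_row box_col j : Int) : Int :=
  PySem.Int.bor (PySem.Int.bor (pvCell possibilities box_row (box_col + j))
    (pvCell possibilities (box_row + 1) (box_col + j))) (pvCell possibilities (box_row + 2) (box_col + j))
def pvLoopB (row_masks col_masks : List Int) : List Int → Bool
  | [] => false
  | num :: rest =>
    let bit : Int := (1 : Int) <<< (num - 1).toNat
    let rows_with : List Int :=
      (PySem.List.pyRange 0 3).filter
        (fun i => PySem.Int.band ((PySem.List.pyGet? row_masks i).getD 0) bit != 0)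
    if !rows_with.isEmpty then
      if rows_with.length = 1 then true
      else
        let cols_with : List Int :=
          (PySem.List.pyRange 0 3).filter
            (fun j => PySem.Int.band ((PySem.List.pyGet? col_masks j).getD 0) bit != 0)
        if cols_with.length = 1 then true
        else pvLoopB row_masks col_masks rest
    else pvLoopB row_masks col_masks rest

def eliminate_pointing_pairs_alt (board : List (List Int)) (possibilities : List (List Int)) (box_row : Int) (box_col : Int) : Bool :=
  let row_masks := (PySem.List.pyRange 0 3).map (fun i => pvRowMask possibilities box_row box_col i)
  let col_masks := (PySem.List.pyRange 0 3).map (fun j => pvColMask possibilities box_row box_col j)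
  pvLoopB row_masks col_masks (PySem.List.pyRange 1 10)

-- ===== PRECONDITION & SPEC =====
-- Helpers for Pre_ only (independent of the ports): validity and value of possibilities[r][c], the box
-- rows / box columns containing candidate bit k, and the first candidate whose sweep A would run.
def pvPreValid (possibilities : List (List Int)) (r c : Int) : Bool :=
  match PySem.List.pyGet? possibilities r with
  | none => false
  | some row => (PySem.List.pyGet? row c).isSome
def pvPreCell (possibilities : List (List Int)) (r c : Int) : Int :=
  (PySem.List.pyGet? ((PySem.List.pyGet? possibilities r).getD []) c).getD 0
def pvPreRows (possibilities : List (List Int)) (box_row box_col : Int) (k : Nat) : List Int :=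
  ([0, 1, 2] : List Int).filter (fun i =>
    ([0, 1, 2] : List Int).any (fun j => (pvPreCell possibilities (box_row+i) (box_col+j)).testBit k))
def pvPreCols (possibilities : List (List Int)) (box_row box_col : Int) (k : Nat) : List Int :=
  ([0, 1, 2] : List Int).filter (fun j =>
    ([0, 1, 2] : List Int).any (fun i => (pvPreCell possibilities (box_row+i) (box_col+j)).testBit k))
def pvPreFirst (possibilities : List (List Int)) (box_row box_col : Int) : Option Nat :=
  (List.range 9).find? (fun k =>
    !(pvPreRows possibilities box_row box_col k).isEmpty &&
    ((pvPreRows possibilities box_row box_col k).length == 1 ||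
     (pvPreCols possibilities box_row box_col k).length == 1))

-- Exactly the inputs on which the Python A completes without IndexError: all nine box reads
-- possibilities[box_row+i][box_col+j] are valid Python indexings, and, for the first candidate digit
-- (if any) confined to a single box row / box column, the length-9 elimination sweep A runs for it
-- stays in range (a single-row sweep needs that box row to be >= 9 wide; a single-column sweep needs
-- >= 9 rows and that column to be a valid index in every swept row).
def Pre_eliminate_pointing_pairs (board : List (List Int)) (possibilities : List (List Int)) (box_row : Int) (box_col : Int) : Prop :=
  (∀ i ∈ ([0, 1, 2] : List Int), ∀ j ∈ ([0, 1, 2] : List Int),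
     pvPreValid possibilities (box_row+i) (box_col+j) = true) ∧
  (∀ k ∈ List.range 9, pvPreFirst possibilities box_row box_col = some k →
     if (pvPreRows possibilities box_row box_col k).length = 1 then
       9 ≤ ((PySem.List.pyGet? possibilities
              (box_row + (pvPreRows possibilities box_row box_col k).headD 0)).getD []).length
     else
       9 ≤ possibilities.length ∧
       (∀ r ∈ ([0, 1, 2, 3, 4, 5, 6, 7, 8] : List Int), r < box_row ∨ box_row + 3 ≤ r →
          pvPreValid possibilities r
            (box_col + (pvPreCols possibilities box_row box_col k).headD 0) = true))
instance (board : List (List Int)) (possibilities : List (List Int)) (box_row : Int) (box_col : Int) : Decidable (Pre_eliminate_pointing_pairs board possibilities box_row box_col) := by unfold Pre_eliminate_pointing_pairs; infer_instance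

def pvWitness_eliminate_pointing_pairs : List (List Int) × List (List Int) × Int × Int :=
  ([], [[0,0,0,0,0,0,0,0,0],[0,0,0,0,0,0,0,0,0],[0,0,0,0,0,0,0,0,0],
        [0,0,0,0,0,0,0,0,0],[0,0,0,0,0,0,0,0,0],[0,0,0,0,0,0,0,0,0],
        [0,0,0,0,0,0,0,0,0],[0,0,0,0,0,0,0,0,0],[0,0,0,0,0,0,0,0,0]], 0, 0)

def Spec_eliminate_pointing_pairs (board : List (List Int)) (possibilities : List (List Int)) (box_row : Int) (box_col : Int) (out : Bool) : Prop := out = eliminate_pointing_pairs_alt board possibilities box_row box_col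
instance (board : List (List Int)) (possibilities : List (List Int)) (box_row : Int) (box_col : Int) (out : Bool) : Decidable (Spec_eliminate_pointing_pairs board possibilities box_row box_col out) := by unfold Spec_eliminate_pointing_pairs; infer_instance

-- ===== CLAIM (what is proved, stated in full; the proofs are below) =====
def Claim_equal_eliminate_pointing_pairs : Prop := ∀ (board : List (List Int)) (possibilities : List (List Int)) (box_row : Int) (box_col : Int), Dom_eliminate_pointing_pairs board possibilities box_row box_col → Pre_eliminate_pointing_pairs board possibilities box_row box_col → Spec_eliminate_pointing_pairs board possibilities box_row box_col (eliminate_pointing_pairs board possibilities box_row box_col)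

-- ===== LEMMAS AND PROOFS =====


theorem pv_sub_and_eq_ldiff (m a : Nat) : m - (m &&& a) = Nat.ldiff m a := by
  induction m using Nat.binaryRec' generalizing a with
  | zero => simp [Nat.ldiff]
  | bit b n h ih =>
    conv_lhs => rw [← a.bit_testBit_zero_shiftRight_one]
    conv_rhs => rw [← a.bit_testBit_zero_shiftRight_one]
    rw [Nat.land_bit, Nat.ldiff_bit, ← ih (a >>> 1)]
    have hle : n &&& (a >>> 1) ≤ n := Nat.and_le_left
    rcases b <;> rcases hb : a.testBit 0 <;> simp [Nat.bit] <;> omega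

theorem pv_band_eq_land (a b : Int) : PySem.Int.band a b = Int.land a b := by
  rcases a with m | m <;> rcases b with n | n <;>
    simp [PySem.Int.band, Int.land, Int.negSucc_eq, pv_sub_and_eq_ldiff] <;> omega

theorem pv_bor_eq_lor (a b : Int) : PySem.Int.bor a b = Int.lor a b := by
  rcases a with m | m <;> rcases b with n | n <;>
    simp [PySem.Int.bor, Int.lor, Int.negSucc_eq, pv_sub_and_eq_ldiff] <;> omega


theorem pv_ldiff_two_pow (k : Nat) (m : Nat) :
    Nat.ldiff (2 ^ k) m = if m.testBit k then 0 else 2 ^ k := by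
  apply Nat.eq_of_testBit_eq
  intro i
  rw [Nat.testBit_ldiff]
  by_cases h : i = k
  · subst h; split <;> simp_all
  · split <;> simp [Ne.symm h]

theorem pv_band_shl (x : Int) (k : Nat) :
    (PySem.Int.band x ((1 : Int) <<< k) != 0) = Int.testBit x k := by
  have h1 : ((1 : Int) <<< k) = Int.ofNat (2 ^ k) := by
    rw [Int.shiftLeft_eq]; simp [Int.ofNat_eq_natCast]
  rw [pv_band_eq_land, h1]
  rcases x with m | m
  · simp [Int.land, Int.testBit, Nat.and_two_pow]
    rcases h : m.testBit k <;> simp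
  · simp [Int.land, Int.testBit, pv_ldiff_two_pow]
    rcases h : m.testBit k <;> simp

theorem pv_testBit_bor (a b : Int) (k : Nat) :
    Int.testBit (PySem.Int.bor a b) k = (Int.testBit a k || Int.testBit b k) := by
  rw [pv_bor_eq_lor, Int.testBit_lor]

theorem pv_range3 (a : Int) : PySem.List.pyRange a (a+3) = [a, a+1, a+2] := by
  rw [PySem.List.pyRange_one]
  have h : (a + 3 - a).toNat = 3 := by omega
  rw [h]
  simp [List.range_succ]

def pvCellsOf (p : Int → Int → Bool) (br bc : Int) : List (Int × Int) :=
  ([br, br+1, br+2] : List Int).flatMap (fun r =>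
    (([bc, bc+1, bc+2] : List Int).filter (p r)).map (fun c => (r, c)))
def pvRWith (p : Int → Int → Bool) (br bc : Int) : List Int :=
  ([0, 1, 2] : List Int).filter (fun i => p (br+i) bc || p (br+i) (bc+1) || p (br+i) (bc+2))
def pvCWith (p : Int → Int → Bool) (br bc : Int) : List Int :=
  ([0, 1, 2] : List Int).filter (fun j => p br (bc+j) || p (br+1) (bc+j) || p (br+2) (bc+j))


theorem pv_mem_fst (p : Int → Int → Bool) (br bc x : Int) :
    x ∈ (pvCellsOf p br bc).map Prod.fst ↔
      x ∈ ([br, br+1, br+2] : List Int) ∧ (p x bc || p x (bc+1) || p x (bc+2)) = true := by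
  simp only [pvCellsOf, List.map_flatMap, List.mem_flatMap, List.map_map, List.mem_map,
    List.mem_filter, Function.comp]
  constructor
  · rintro ⟨r, hr, ⟨c, ⟨hc, hp⟩, rfl⟩⟩
    refine ⟨hr, ?_⟩
    fin_cases hc <;> simp_all
  · rintro ⟨hr, hp⟩
    simp only [Bool.or_eq_true] at hp
    rcases hp with (h | h) | h
    · exact ⟨x, hr, bc, ⟨by simp, h⟩, rfl⟩
    · exact ⟨x, hr, bc + 1, ⟨by simp, h⟩, rfl⟩
    · exact ⟨x, hr, bc + 2, ⟨by simp, h⟩, rfl⟩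

theorem pv_mem_snd (p : Int → Int → Bool) (br bc x : Int) :
    x ∈ (pvCellsOf p br bc).map Prod.snd ↔
      x ∈ ([bc, bc+1, bc+2] : List Int) ∧ (p br x || p (br+1) x || p (br+2) x) = true := by
  simp only [pvCellsOf, List.map_flatMap, List.mem_flatMap, List.map_map, List.mem_map,
    List.mem_filter, Function.comp]
  constructor
  · rintro ⟨r, hr, ⟨c, ⟨hc, hp⟩, rfl⟩⟩
    refine ⟨hc, ?_⟩
    fin_cases hr <;> simp_all
  · rintro ⟨hc, hp⟩
    simp only [Bool.or_eq_true] at hp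
    rcases hp with (h | h) | h
    · exact ⟨br, by simp, x, ⟨hc, h⟩, rfl⟩
    · exact ⟨br + 1, by simp, x, ⟨hc, h⟩, rfl⟩
    · exact ⟨br + 2, by simp, x, ⟨hc, h⟩, rfl⟩

theorem pv_dedup_len3 (xs : List Int) (a b c : Int) (hab : a ≠ b) (hac : a ≠ c) (hbc : b ≠ c)
    (hsub : ∀ x ∈ xs, x = a ∨ x = b ∨ x = c) :
    (PySem.Set.ofList xs).length =
      ((if a ∈ xs then 1 else 0) + (if b ∈ xs then 1 else 0) + (if c ∈ xs then 1 else 0) : Nat) := by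
  rw [← PySem.List.dedup_eq_ofList]
  have hperm : List.Perm (PySem.List.dedup xs) ([a, b, c].filter (fun x => decide (x ∈ xs))) := by
    rw [List.perm_ext_iff_of_nodup (PySem.List.nodup_dedup xs)]
    · intro x
      rw [PySem.List.mem_dedup, List.mem_filter]
      simp only [List.mem_cons, List.not_mem_nil, or_false, decide_eq_true_eq]
      constructor
      · intro hx; exact ⟨hsub x hx, hx⟩
      · rintro ⟨-, hx⟩; exact hx
    · exact List.Nodup.filter _ (by simp [hab, hac, hbc])
  rw [hperm.length_eq]
  by_cases ha : a ∈ xs <;> by_cases hb : b ∈ xs <;> by_cases hc : c ∈ xs <;>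
    simp [List.filter, ha, hb, hc]



theorem pv_rows_len (p : Int → Int → Bool) (br bc : Int) :
    (PySem.Set.ofList ((pvCellsOf p br bc).map Prod.fst)).length = (pvRWith p br bc).length := by
  rw [pv_dedup_len3 _ br (br+1) (br+2) (by omega) (by omega) (by omega)
    (fun x hx => by simpa using ((pv_mem_fst p br bc x).mp hx).1)]
  simp only [pvRWith, List.filter, pv_mem_fst, List.mem_cons, List.not_mem_nil]
  norm_num
  rcases h0 : (p br bc || p br (bc+1) || p br (bc+2)) <;>
    rcases h1 : (p (br+1) bc || p (br+1) (bc+1) || p (br+1) (bc+2)) <;>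
    rcases h2 : (p (br+2) bc || p (br+2) (bc+1) || p (br+2) (bc+2)) <;>
    simp_all

theorem pv_cols_len (p : Int → Int → Bool) (br bc : Int) :
    (PySem.Set.ofList ((pvCellsOf p br bc).map Prod.snd)).length = (pvCWith p br bc).length := by
  rw [pv_dedup_len3 _ bc (bc+1) (bc+2) (by omega) (by omega) (by omega)
    (fun x hx => by simpa using ((pv_mem_snd p br bc x).mp hx).1)]
  simp only [pvCWith, List.filter, pv_mem_snd, List.mem_cons, List.not_mem_nil]
  norm_num
  rcases h0 : (p br bc || p (br+1) bc || p (br+2) bc) <;>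
    rcases h1 : (p br (bc+1) || p (br+1) (bc+1) || p (br+2) (bc+1)) <;>
    rcases h2 : (p br (bc+2) || p (br+1) (bc+2) || p (br+2) (bc+2)) <;>
    simp_all

theorem pv_nonempty (p : Int → Int → Bool) (br bc : Int) :
    ((pvCellsOf p br bc).length > 0) ↔ pvRWith p br bc ≠ [] := by
  have h : (pvCellsOf p br bc).length > 0 ↔ ((pvCellsOf p br bc).map Prod.fst) ≠ [] := by
    simp [List.length_pos_iff]
  rw [h]
  constructor
  · intro hne
    obtain ⟨x, hx⟩ := List.exists_mem_of_ne_nil _ hne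
    obtain ⟨hmem, hp⟩ := (pv_mem_fst p br bc x).mp hx
    intro hnil
    fin_cases hmem
    · have : (0:Int) ∈ pvRWith p br bc := by simp [pvRWith]; simpa using hp
      simp [hnil] at this
    · have : (1:Int) ∈ pvRWith p br bc := by simp [pvRWith]; simpa using hp
      simp [hnil] at this
    · have : (2:Int) ∈ pvRWith p br bc := by simp [pvRWith]; simpa using hp
      simp [hnil] at this
  · intro hne
    obtain ⟨i, hi⟩ := List.exists_mem_of_ne_nil _ hne
    simp only [pvRWith, List.mem_filter, List.mem_cons, List.not_mem_nil] at hi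
    intro hnil
    have : (br + i) ∈ (pvCellsOf p br bc).map Prod.fst := by
      rw [pv_mem_fst]
      refine ⟨?_, hi.2⟩
      rcases hi.1 with h | h | h | h <;> simp [h]
    simp [hnil] at this

theorem pv_cellsA (poss : List (List Int)) (br bc : Int) (k : Nat) :
    ((PySem.List.pyRange br (br + 3)).flatMap (fun r =>
        ((PySem.List.pyRange bc (bc + 3)).filter
          (fun c => pvBit poss ((1 : Int) <<< k) r c)).map (fun c => (r, c))))
      = pvCellsOf (fun r c => (pvCell poss r c).testBit k) br bc := by
  simp only [pv_range3, pvCellsOf, pvBit, pv_band_shl]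

theorem pv_rowsB (poss : List (List Int)) (br bc : Int) (k : Nat) :
    (PySem.List.pyRange 0 3).filter (fun i => PySem.Int.band
        ((PySem.List.pyGet? ((PySem.List.pyRange 0 3).map
          (fun i => pvRowMask poss br bc i)) i).getD 0) ((1 : Int) <<< k) != 0)
      = pvRWith (fun r c => (pvCell poss r c).testBit k) br bc := by
  show ([0,1,2] : List Int).filter _ = _
  simp [List.filter, PySem.List.pyGet?, PySem.List.pyIdx?, pv_band_shl, pvRowMask,
    pv_testBit_bor, pvRWith]

theorem pv_colsB (poss : List (List Int)) (br bc : Int) (k : Nat) :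
    (PySem.List.pyRange 0 3).filter (fun j => PySem.Int.band
        ((PySem.List.pyGet? ((PySem.List.pyRange 0 3).map
          (fun j => pvColMask poss br bc j)) j).getD 0) ((1 : Int) <<< k) != 0)
      = pvCWith (fun r c => (pvCell poss r c).testBit k) br bc := by
  show ([0,1,2] : List Int).filter _ = _
  simp [List.filter, PySem.List.pyGet?, PySem.List.pyIdx?, pv_band_shl, pvColMask,
    pv_testBit_bor, pvCWith]

theorem pv_main (possibilities : List (List Int)) (box_row box_col : Int) (nums : List Int) :
    pvLoopA possibilities box_row box_col nums =
      pvLoopB ((PySem.List.pyRange 0 3).map (fun i => pvRowMask possibilities box_row box_col i))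
        ((PySem.List.pyRange 0 3).map (fun j => pvColMask possibilities box_row box_col j)) nums := by
  induction nums with
  | nil => rfl
  | cons num rest ih =>
    rw [pvLoopA, pvLoopB]
    simp only [pv_cellsA, pv_rowsB, pv_colsB]
    set p : Int → Int → Bool := fun r c => (pvCell possibilities r c).testBit ((num - 1).toNat) with hp
    have hset1 : PySem.Set.len (PySem.Set.ofList ((pvCellsOf p box_row box_col).map Prod.fst))
        = ((pvRWith p box_row box_col).length : Int) := by
      simp only [PySem.Set.len, pv_rows_len]
    have hset2 : PySem.Set.len (PySem.Set.ofList ((pvCellsOf p box_row box_col).map Prod.snd))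
        = ((pvCWith p box_row box_col).length : Int) := by
      simp only [PySem.Set.len, pv_cols_len]
    by_cases h0 : pvRWith p box_row box_col = []
    · have hA : ¬ ((pvCellsOf p box_row box_col).length > 0) := by
        rw [pv_nonempty]; simpa using h0
      have hB : ¬ ((!(pvRWith p box_row box_col).isEmpty) = true) := by simp [h0]
      rw [if_neg hA, if_neg hB]
      exact ih
    · have hA : (pvCellsOf p box_row box_col).length > 0 := (pv_nonempty p box_row box_col).mpr h0
      have hB : (!(pvRWith p box_row box_col).isEmpty) = true := by
        simpa [List.isEmpty_iff] using h0
      rw [if_pos hA, if_pos hB]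
      by_cases h1 : (pvRWith p box_row box_col).length = 1
      · have hA1 : PySem.Set.len (PySem.Set.ofList ((pvCellsOf p box_row box_col).map Prod.fst)) = 1 := by
          rw [hset1, h1]; rfl
        rw [if_pos hA1, if_pos h1]
      · have hA1 : ¬ (PySem.Set.len (PySem.Set.ofList ((pvCellsOf p box_row box_col).map Prod.fst)) = 1) := by
          rw [hset1]; exact_mod_cast h1
        rw [if_neg hA1, if_neg h1]
        by_cases h2 : (pvCWith p box_row box_col).length = 1
        · have hA2 : PySem.Set.len (PySem.Set.ofList ((pvCellsOf p box_row box_col).map Prod.snd)) = 1 := by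
            rw [hset2, h2]; rfl
          rw [if_pos hA2, if_pos h2]
        · have hA2 : ¬ (PySem.Set.len (PySem.Set.ofList ((pvCellsOf p box_row box_col).map Prod.snd)) = 1) := by
            rw [hset2]; exact_mod_cast h2
          rw [if_neg hA2, if_neg h2]
          exact ih

-- ===== VERDICT (by name: the statement is the Claim_ definition above) =====
theorem eliminate_pointing_pairs_spec : Claim_equal_eliminate_pointing_pairs := by
  intro board possibilities box_row box_col _hDom _hPre
  unfold Spec_eliminate_pointing_pairs eliminate_pointing_pairs eliminate_pointing_pairs_alt
  exact pv_main possibilities box_row box_col _
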